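-- pv_equiv track=rewrite | github.com/atariso/atcoder | practice/ARC_106.py | search
-- ===== SOURCE A (Python) =====
-- def search(n):
--     for a in range(1, 100):
--         pow3 = 3 ** a
--         diff_0 = n - pow3
--         if diff_0 < 5:
--             return False, -1, -1
--         is_int = True
--         diff = diff_0
--         b = 1
--         while is_int:
--             quo = diff // 5 ** b
--             rem = diff % 5 ** b
--             if quo == 1 and rem == 0:
--                 return True, a, b
--             elif rem == 0:
--                 b += 1
--             else:
--                 is_int = False
-- ===== SOURCE B (Python) =====
-- # Table-lookup reimplementation: the inner divisibility walk disappears entirely;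
-- # a precomputed dict of powers of five answers "is diff = 5**b" in one hash lookup.
-- POW5 = {5 ** b: b for b in range(1, 100)}
--
-- def search(n):
--     for a in range(1, 100):
--         diff = n - 3 ** a
--         if diff < 5:
--             return False, -1, -1
--         b = POW5.get(diff)
--         if b is not None:
--             return True, a, b
-- ===== Notes on version B (the rewrite author's own statement) =====
-- stated objective: alternative
-- what changed: The inner quotient/remainder walk over growing powers of five is removed entirely: B precomputes a dict mapping 5**b to b once and decides 'diff is a power of five' by a single hash lookup per outer iteration.
import Mathlib
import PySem

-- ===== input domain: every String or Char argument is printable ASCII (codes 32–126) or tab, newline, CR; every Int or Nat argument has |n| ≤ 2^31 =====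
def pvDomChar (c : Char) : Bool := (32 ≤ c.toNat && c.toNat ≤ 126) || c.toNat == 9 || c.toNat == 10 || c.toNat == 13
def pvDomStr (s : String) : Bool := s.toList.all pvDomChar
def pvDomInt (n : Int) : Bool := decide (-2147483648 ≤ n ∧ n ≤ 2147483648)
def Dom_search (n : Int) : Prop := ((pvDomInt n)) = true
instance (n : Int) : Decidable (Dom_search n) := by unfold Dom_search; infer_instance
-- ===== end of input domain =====

set_option maxRecDepth 4000


-- B removes A's inner quotient/remainder walk: a dict of powers of five, built once,
-- answers "is diff a power of five" by one lookup per outer iteration (alternative).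

-- ===== PORT A =====
-- inner 'while is_int' loop of A; fuel only makes the recursion structural — b grows at
-- most until 5^b exceeds diff, so the fuel passed below is never exhausted for diff ≥ 5
def searchInner (diff : Int) (b : Int) : Nat → Option Int
  | 0 => none
  | fuel+1 =>
    let quo := PySem.Int.floordiv diff ((5:Int) ^ b.toNat)
    let rem := PySem.Int.mod diff ((5:Int) ^ b.toNat)
    if quo = 1 ∧ rem = 0 then some b
    else if rem = 0 then searchInner diff (b + 1) fuel
    else none

def searchLoop (n : Int) : List Int → Bool × Int × Int
  | [] => (false, -1, -1)   -- Python falls off the range and returns None; unreachable for |n| ≤ 2^31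
  | a :: rest =>
    let pow3 := (3:Int) ^ a.toNat
    let diff0 := n - pow3
    if diff0 < 5 then (false, -1, -1)
    else
      match searchInner diff0 1 (diff0.natAbs + 2) with
      | some b => (true, a, b)
      | none => searchLoop n rest

def search (n : Int) : Bool × Int × Int := searchLoop n (PySem.List.pyRange 1 100 1)

-- ===== PORT B =====
-- module-level POW5 = {5 ** b: b for b in range(1, 100)}
def pow5Dict : PySem.Dict Int Int :=
  (PySem.List.pyRange 1 100 1).foldl (fun d b => d.insert ((5:Int) ^ b.toNat) b) PySem.Dict.empty

def searchAltLoop (n : Int) : List Int → Bool × Int × Int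
  | [] => (false, -1, -1)   -- Python falls off the range and returns None; unreachable for |n| ≤ 2^31
  | a :: rest =>
    let diff := n - (3:Int) ^ a.toNat
    if diff < 5 then (false, -1, -1)
    else
      match pow5Dict.get? diff with   -- b = POW5.get(diff); if b is not None: …
      | some b => (true, a, b)
      | none => searchAltLoop n rest

def search_alt (n : Int) : Bool × Int × Int := searchAltLoop n (PySem.List.pyRange 1 100 1)

-- ===== PRECONDITION & SPEC =====
def Spec_search (n : Int) (out : Bool × Int × Int) : Prop := out = search_alt n
instance (n : Int) (out : Bool × Int × Int) : Decidable (Spec_search n out) := by unfold Spec_search; infer_instance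

-- ===== CLAIM (what is proved, stated in full; the proofs are below) =====
def Claim_equal_search : Prop := ∀ (n : Int), Dom_search n → Spec_search n (search n)

-- ===== LEMMAS AND PROOFS =====

-- every positive integer is 5^v * m with 5 ∤ m
theorem pv_exists_factor (d : Int) (hd : 0 < d) :
    ∃ (v : Nat) (m : Int), d = 5 ^ v * m ∧ 0 < m ∧ ¬ (5:Int) ∣ m := by
  have hN : d.toNat ≠ 0 := by omega
  refine ⟨d.toNat.factorization 5, ((d.toNat / 5 ^ (d.toNat.factorization 5)) : Nat), ?_, ?_, ?_⟩
  · have h := Nat.ordProj_mul_ordCompl_eq_self d.toNat 5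
    have h2 : ((5 ^ (d.toNat.factorization 5) * (d.toNat / 5 ^ (d.toNat.factorization 5)) : Nat) : Int) = d := by
      rw [h]; omega
    push_cast at h2
    exact h2.symm
  · exact_mod_cast Nat.ordCompl_pos 5 hN
  · intro h
    exact Nat.not_dvd_ordCompl (p := 5) (by norm_num) hN (by exact_mod_cast h)

-- characterization of A's inner loop
theorem searchInner_char (v : Nat) (m : Int) (hm : 0 < m) (h5 : ¬ (5:Int) ∣ m) :
    ∀ (fuel : Nat) (b : Nat), 1 ≤ b → b ≤ v + 1 → v + 2 ≤ fuel + b →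
      searchInner (5 ^ v * m) (b : Int) fuel =
        if m = 1 ∧ b ≤ v then some (v : Int) else none := by
  intro fuel
  induction fuel with
  | zero => intro b _ hb2 hf; omega
  | succ f ih =>
    intro b hb1 hb2 hf
    have hpowpos : (0:Int) < 5 ^ b := by positivity
    have htn : ((b:Int)).toNat = b := Int.toNat_natCast b
    by_cases hble : b ≤ v
    · -- 5^b divides diff
      have hdvd : (5:Int) ^ b ∣ 5 ^ v * m :=
        dvd_mul_of_dvd_left (pow_dvd_pow 5 hble) m
      have hrem : PySem.Int.mod (5 ^ v * m) ((5:Int) ^ b) = 0 :=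
        (PySem.Int.mod_eq_zero_iff_dvd _ _).mpr hdvd
      have hquo : PySem.Int.floordiv (5 ^ v * m) ((5:Int) ^ b) = 5 ^ (v - b) * m := by
        rw [PySem.Int.floordiv_eq_ediv_of_pos hpowpos]
        have h : (5:Int) ^ v * m = 5 ^ b * (5 ^ (v - b) * m) := by
          rw [← mul_assoc, ← pow_add, Nat.add_sub_cancel' hble]
        rw [h]
        exact Int.mul_ediv_cancel_left _ (by positivity)
      by_cases hone : m = 1 ∧ b = v
      · have hcond : (5:Int) ^ (v - b) * m = 1 := by
          rw [hone.1, hone.2]; simp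
        simp only [searchInner, htn, hquo, hrem, hcond]
        simp [hone.1, hone.2]
      · have hq1 : (5:Int) ^ (v - b) * m ≠ 1 := by
          intro h
          rcases Decidable.not_and_iff_or_not.mp hone with hm1 | hbv
          · have h1 : (1:Int) ≤ 5 ^ (v - b) := one_le_pow₀ (by norm_num)
            have h2 : (2:Int) ≤ m := by
              rcases lt_or_ge m 2 with h' | h'
              · omega
              · exact h'
            nlinarith
          · have hbv' : b < v := by omega
            have h1 : (5:Int) ≤ 5 ^ (v - b) := by
              calc (5:Int) = 5 ^ 1 := (pow_one 5).symm
              _ ≤ 5 ^ (v - b) := pow_le_pow_right₀ (by norm_num) (by omega)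
            nlinarith
        simp only [searchInner, htn, hquo, hrem]
        rw [if_neg (by simp [hq1]), if_pos trivial]
        have hcast : (b:Int) + 1 = ((b + 1 : Nat) : Int) := by push_cast; ring
        rw [hcast, ih (b+1) (by omega) (by omega) (by omega)]
        by_cases hm1 : m = 1
        · have hbv : b ≠ v := fun h => hone ⟨hm1, h⟩
          by_cases hb1v : b + 1 ≤ v
          · rw [if_pos ⟨hm1, hb1v⟩, if_pos ⟨hm1, hble⟩]
          · exact absurd (by omega : b = v) hbv
        · rw [if_neg (fun h => hm1 h.1), if_neg (fun h => hm1 h.1)]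
    · -- b = v + 1 : 5^b does not divide diff
      have hndvd : ¬ (5:Int) ^ b ∣ 5 ^ v * m := by
        have hb : b = v + 1 := by omega
        rw [hb, pow_succ]
        intro h
        exact h5 ((mul_dvd_mul_iff_left (pow_ne_zero v (by norm_num : (5:Int) ≠ 0))).mp h)
      have hrem : PySem.Int.mod (5 ^ v * m) ((5:Int) ^ b) ≠ 0 := by
        rw [Ne, PySem.Int.mod_eq_zero_iff_dvd]; exact hndvd
      simp only [searchInner, htn]
      rw [if_neg (fun h => hrem h.2), if_neg hrem, if_neg (fun h => (by omega : ¬ b ≤ v) h.2)]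

-- the key function of B's dict comprehension is injective on range(1,100)
theorem pv_key_inj : ∀ x ∈ PySem.List.pyRange 1 100 1, ∀ y ∈ PySem.List.pyRange 1 100 1,
    (5:Int) ^ x.toNat = (5:Int) ^ y.toNat → x = y := by
  intro x hx y hy h
  rw [PySem.List.mem_pyRange_one] at hx hy
  have hx' : ((x.toNat : Int)) = x := Int.toNat_of_nonneg (by omega)
  have hy' : ((y.toNat : Int)) = y := Int.toNat_of_nonneg (by omega)
  have h' : ((5 ^ x.toNat : Nat) : Int) = ((5 ^ y.toNat : Nat) : Int) := by push_cast; exact h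
  have := Nat.pow_right_injective (by norm_num : 2 ≤ 5) (Nat.cast_injective h')
  omega

theorem pv_items : pow5Dict.items =
    (PySem.List.pyRange 1 100 1).map (fun b => ((5:Int) ^ b.toNat, b)) := by
  unfold pow5Dict
  rw [PySem.Dict.items_foldl_insert_fresh _ _ _ _
    (fun a _ => PySem.Dict.contains_empty _)
    ((PySem.List.nodup_pyRange_one 1 100).map_on pv_key_inj)]
  rfl

theorem pv_keys_nodup : pow5Dict.keys.Nodup := by
  have : pow5Dict.keys = (PySem.List.pyRange 1 100 1).map (fun b => (5:Int) ^ b.toNat) := by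
    simp only [PySem.Dict.keys, pv_items, List.map_map]; rfl
  rw [this]
  exact (PySem.List.nodup_pyRange_one 1 100).map_on pv_key_inj

-- lookup at a genuine power: POW5[5^v] = v for 1 ≤ v ≤ 99
theorem pv_get_pow (v : Nat) (h1 : 1 ≤ v) (h2 : v ≤ 99) :
    pow5Dict.get? ((5:Int) ^ v) = some (v : Int) := by
  have hmem : (((5:Int) ^ v, (v : Int)) : Int × Int) ∈ pow5Dict.items := by
    rw [pv_items]
    refine List.mem_map.mpr ⟨(v : Int), ?_, ?_⟩
    · rw [PySem.List.mem_pyRange_one]; omega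
    · simp
  exact PySem.Dict.get?_of_mem_items _ hmem pv_keys_nodup

-- lookup at a non-power: POW5.get(d) is None
theorem pv_get_none (d : Int) (h : ∀ u : Nat, 1 ≤ u → u ≤ 99 → d ≠ 5 ^ u) :
    pow5Dict.get? d = none := by
  rw [PySem.Dict.get?_eq_none_iff_not_mem_keys]
  intro hmem
  have hk : pow5Dict.keys = (PySem.List.pyRange 1 100 1).map (fun b => (5:Int) ^ b.toNat) := by
    simp only [PySem.Dict.keys, pv_items, List.map_map]; rfl
  rw [hk, List.mem_map] at hmem
  obtain ⟨b, hb, hbd⟩ := hmem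
  rw [PySem.List.mem_pyRange_one] at hb
  exact h b.toNat (by omega) (by omega) hbd.symm

-- the per-iteration agreement: A's inner walk equals B's dict lookup (diff large enough and within the domain bound)
theorem pv_step_eq (diff : Int) (hd : 5 ≤ diff) (hub : diff ≤ 2147483648) :
    searchInner diff 1 (diff.natAbs + 2) = pow5Dict.get? diff := by
  obtain ⟨v, m, rfl, hm, h5⟩ := pv_exists_factor diff (by omega)
  have hvlt : (v:Int) < 5 ^ v := by
    exact_mod_cast Nat.lt_pow_self (n := v) (by norm_num : 1 < 5)
  have hple : (5:Int) ^ v ≤ 5 ^ v * m := le_mul_of_one_le_right (by positivity) hm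
  have hvabs : v ≤ (5 ^ v * m : Int).natAbs := by
    have h0 : ((5 ^ v * m : Int).natAbs : Int) = 5 ^ v * m := Int.natAbs_of_nonneg (by omega)
    omega
  have hA := searchInner_char v m hm h5 ((5 ^ v * m : Int).natAbs + 2) 1
    (le_refl 1) (by omega) (by omega)
  simp only [Nat.cast_one] at hA
  by_cases hm1 : m = 1
  · have hv1 : 1 ≤ v := by
      rcases Nat.eq_zero_or_pos v with h0 | h
      · exfalso; rw [h0, hm1] at hd; norm_num at hd
      · exact h
    have hv99 : v ≤ 99 := by
      by_contra hbig
      have h14 : (5:Int) ^ 14 ≤ 5 ^ v :=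
        pow_le_pow_right₀ (by norm_num) (by omega)
      rw [hm1, mul_one] at hub
      norm_num at h14
      omega
    rw [hA, if_pos ⟨hm1, hv1⟩, hm1, mul_one, pv_get_pow v hv1 hv99]
  · rw [hA, if_neg (fun h => hm1 h.1)]
    rw [pv_get_none]
    intro u hu1 _ heq
    rcases le_or_gt v u with hvu | huv
    · have : (5:Int) ^ v * m = 5 ^ v * 5 ^ (u - v) := by
        rw [heq, ← pow_add, Nat.add_sub_cancel' hvu]
      have hmeq : m = 5 ^ (u - v) := by
        have h5v : (5:Int) ^ v ≠ 0 := by positivity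
        exact mul_left_cancel₀ h5v this
      rcases Nat.eq_or_lt_of_le hvu with h | h
      · rw [← h] at hmeq; simp at hmeq; exact hm1 hmeq
      · apply h5
        rw [hmeq]
        exact dvd_pow_self 5 (by omega)
    · have : (5:Int) ^ u * (5 ^ (v - u) * m) = 5 ^ u * 1 := by
        rw [← mul_assoc, ← pow_add, Nat.add_sub_cancel' (by omega : u ≤ v), mul_one, heq]
      have h1 : (5:Int) ^ (v - u) * m = 1 := by
        have h5u : (5:Int) ^ u ≠ 0 := by positivity
        exact mul_left_cancel₀ h5u this
      have h2 : (5:Int) ≤ 5 ^ (v - u) := by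
        calc (5:Int) = 5 ^ 1 := (pow_one 5).symm
        _ ≤ 5 ^ (v - u) := pow_le_pow_right₀ (by norm_num) (by omega)
      nlinarith

-- the two outer scans agree on every consecutive range starting at a ≥ 1
theorem pv_loop_eq (k : Nat) : ∀ (a : Nat) (n : Int), 1 ≤ a → n ≤ 2147483648 →
    searchLoop n (PySem.List.pyRange (a : Int) ((a : Int) + (k : Int)) 1) =
    searchAltLoop n (PySem.List.pyRange (a : Int) ((a : Int) + (k : Int)) 1) := by
  induction k with
  | zero =>
    intro a n _ _
    rw [PySem.List.pyRange_one_eq_nil (by simp)]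
    rfl
  | succ k ih =>
    intro a n ha hn
    rw [PySem.List.pyRange_one_cons (by push_cast; omega)]
    have htn : ((a:Int)).toNat = a := Int.toNat_natCast a
    rw [searchLoop, searchAltLoop]
    simp only [htn]
    set diff := n - (3:Int) ^ a with hdiff
    by_cases hlt : diff < 5
    · simp [hlt]
    · simp only [if_neg hlt]
      have hge : 5 ≤ diff := by omega
      have h3pos : (0:Int) < 3 ^ a := by positivity
      have hub : diff ≤ 2147483648 := by omega
      rw [pv_step_eq diff hge hub]
      cases hget : pow5Dict.get? diff with
      | some b => rfl
      | none =>
        have hlist : (PySem.List.pyRange ((a:Int) + 1) ((a:Int) + ((k + 1 : Nat) : Int)) 1) =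
            (PySem.List.pyRange ((a + 1 : Nat) : Int) (((a + 1 : Nat) : Int) + (k : Int)) 1) := by
          congr 1
          push_cast
          ring
        rw [hlist]
        exact ih (a + 1) n (by omega) hn

-- ===== VERDICT (by name: the statement is the Claim_ definition above) =====
theorem search_spec : Claim_equal_search := by
  intro n hdom
  unfold Spec_search search search_alt
  have hn : n ≤ 2147483648 := by
    unfold Dom_search pvDomInt at hdom
    simpa using (of_decide_eq_true hdom).2
  have h := pv_loop_eq 99 1 n (le_refl 1) hn
  norm_num at h
  exact h
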